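-- pv_equiv track=rewrite | github.com/wadiim/nemo2 | nemo2.py | find_brackets_pair
-- ===== SOURCE A (Python) =====
-- def find_brackets_pair(string, opening, closing):
-- 	begin = find_non_escaped(opening, string)
-- 	if begin == -1: return begin, find_non_escaped(closing, string)
-- 	end, ratio = -1, 1
-- 	for i in range(begin+1, len(string)):
-- 		if is_escaped(i, string): continue
-- 		if string[i] == opening: ratio += 1
-- 		elif string[i] == closing: ratio -= 1
-- 		if ratio == 0:
-- 			end = i
-- 			break
-- 	return begin, end
--
-- def find_non_escaped(char, string):
-- 	pos = -1
-- 	while True: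
-- 		pos = string.find(char, pos+1)
-- 		if not is_escaped(pos, string): break
-- 	return pos
--
-- def is_escaped(pos, string):
-- 	index, bscount = pos-1, 0
-- 	while index >= 0 and string[index] == '\\':
-- 		bscount += 1
-- 		index -= 1
-- 	return bscount % 2
-- ===== SOURCE B (Python) =====
-- def find_brackets_pair(string, opening, closing):
-- 	n = len(string)
-- 	escaped = False
-- 	begin, first_close, ratio = -1, -1, 1
-- 	for i in range(n + 1):
-- 		cur = escaped
-- 		escaped = i < n and string[i] == '\\' and not cur
-- 		if cur:
-- 			continue
-- 		if begin == -1: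
-- 			if string.startswith(opening, i):
-- 				begin = i
-- 			elif first_close == -1 and string.startswith(closing, i):
-- 				first_close = i
-- 		elif i < n:
-- 			if string[i] == opening:
-- 				ratio += 1
-- 			elif string[i] == closing:
-- 				ratio -= 1
-- 			if ratio == 0:
-- 				return begin, i
-- 	return (begin, -1) if begin != -1 else (-1, first_close)
-- ===== Notes on version B (the rewrite author's own statement) =====
-- stated objective: simpler
-- what changed: A finds brackets via repeated str.find calls plus an O(n) backward backslash-rescan at every candidate position (helpers find_non_escaped/is_escaped); B is a single left-to-right scan that carries the escape parity in one boolean, finding the first unescaped opening/closing and counting depth in the same pass.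
import Mathlib
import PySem

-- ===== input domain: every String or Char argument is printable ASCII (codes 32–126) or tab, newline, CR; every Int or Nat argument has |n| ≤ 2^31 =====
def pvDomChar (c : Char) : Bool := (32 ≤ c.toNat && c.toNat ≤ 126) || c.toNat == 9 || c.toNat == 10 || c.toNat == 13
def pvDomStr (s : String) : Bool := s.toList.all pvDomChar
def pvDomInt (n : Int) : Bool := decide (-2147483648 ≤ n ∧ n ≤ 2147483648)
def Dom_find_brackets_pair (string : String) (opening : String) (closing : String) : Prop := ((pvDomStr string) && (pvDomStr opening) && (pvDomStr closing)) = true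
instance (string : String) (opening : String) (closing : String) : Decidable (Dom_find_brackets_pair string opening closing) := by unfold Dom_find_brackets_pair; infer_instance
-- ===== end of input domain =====

-- B replaces A's repeated str.find + backward backslash-rescans by a single left-to-right scan
-- carrying the escape parity; same return value, simpler one-pass structure.


-- ===== PORT A =====
-- is_escaped: backward while-loop counting backslashes; returns bscount % 2
def pvIsEscapedGo (s : List Char) (index : Int) (bscount : Nat) : Nat :=
  if h : 0 ≤ index ∧ PySem.List.pyGet? s index = some '\\' then
    pvIsEscapedGo s (index - 1) (bscount + 1)
  else bscount
termination_by (index + 1).toNat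
decreasing_by omega

def pv_is_escaped (pos : Int) (s : List Char) : Nat :=
  pvIsEscapedGo s (pos - 1) 0 % 2

-- find_non_escaped: while True: pos = string.find(char, pos+1); if not is_escaped(pos): break
-- (fuel only makes the loop total; pos strictly increases, so s.length + 2 steps always suffice)
def pvFindNEGo (s sub : List Char) (fuel : Nat) (pos : Int) : Int :=
  match fuel with
  | 0 => pos
  | f + 1 =>
    let pos' := PySem.Chars.findFrom s sub (pos + 1)
    if pv_is_escaped pos' s ≠ 0 then pvFindNEGo s sub f pos' else pos'

def pv_find_non_escaped (sub s : List Char) : Int :=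
  pvFindNEGo s sub (s.length + 2) (-1)

-- for i in range(begin+1, len(string)): … (s.getD i ' ' is the in-range string[i])
def pvADepthGo (s op cl : List Char) (i : Nat) (ratio : Int) : Int :=
  if i < s.length then
    if pv_is_escaped (i : Int) s ≠ 0 then pvADepthGo s op cl (i + 1) ratio
    else
      let c := s.getD i ' '
      let ratio' := if [c] = op then ratio + 1 else if [c] = cl then ratio - 1 else ratio
      if ratio' = 0 then (i : Int) else pvADepthGo s op cl (i + 1) ratio'
  else -1
termination_by s.length - i

def find_brackets_pair (string : String) (opening : String) (closing : String) : Int × Int :=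
  let s := string.toList
  let op := opening.toList
  let cl := closing.toList
  let begin := pv_find_non_escaped op s
  if begin = -1 then (begin, pv_find_non_escaped cl s)
  else (begin, pvADepthGo s op cl (begin + 1).toNat 1)

-- ===== PORT B =====
-- single forward scan i = 0..n carrying the escape parity `escaped`
-- (Chars.startswith (s.drop i) sub is exactly string.startswith(sub, i) for 0 ≤ i ≤ n)
def pvBGo (s op cl : List Char) (i : Nat) (escaped : Bool) (begin fc ratio : Int) : Int × Int :=
  if i < s.length + 1 then
    let cur := escaped
    let esc' := decide (i < s.length) && (s.getD i ' ' == '\\') && !cur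
    if cur then pvBGo s op cl (i + 1) esc' begin fc ratio
    else if begin = -1 then
      if PySem.Chars.startswith (s.drop i) op then pvBGo s op cl (i + 1) esc' (i : Int) fc ratio
      else if fc = -1 ∧ PySem.Chars.startswith (s.drop i) cl then pvBGo s op cl (i + 1) esc' begin (i : Int) ratio
      else pvBGo s op cl (i + 1) esc' begin fc ratio
    else if i < s.length then
      let c := s.getD i ' '
      let ratio' := if [c] = op then ratio + 1 else if [c] = cl then ratio - 1 else ratio
      if ratio' = 0 then (begin, (i : Int)) else pvBGo s op cl (i + 1) esc' begin fc ratio'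
    else pvBGo s op cl (i + 1) esc' begin fc ratio
  else if begin ≠ -1 then (begin, -1) else (-1, fc)
termination_by s.length + 1 - i

def find_brackets_pair_alt (string : String) (opening : String) (closing : String) : Int × Int :=
  pvBGo string.toList opening.toList closing.toList 0 false (-1) (-1) 1

-- ===== PRECONDITION & SPEC =====
def Spec_find_brackets_pair (string : String) (opening : String) (closing : String) (out : Int × Int) : Prop := out = find_brackets_pair_alt string opening closing
instance (string : String) (opening : String) (closing : String) (out : Int × Int) : Decidable (Spec_find_brackets_pair string opening closing out) := by unfold Spec_find_brackets_pair; infer_instance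

-- ===== CLAIM (what is proved, stated in full; the proofs are below) =====
def Claim_equal_find_brackets_pair : Prop := ∀ (string : String) (opening : String) (closing : String), Dom_find_brackets_pair string opening closing → Spec_find_brackets_pair string opening closing (find_brackets_pair string opening closing)

-- ===== LEMMAS AND PROOFS =====

-- escape parity before position i (the value B's `escaped` holds on entering step i)
def pvP (s : List Char) : Nat → Bool
  | 0 => false
  | i + 1 => (s.getD i ' ' == '\\') && !(pvP s i)

-- first position j ≥ i (j ≤ n) that is unescaped and where sub occurs, else -1
def pvFU (s sub : List Char) (i : Nat) : Int :=
  if i < s.length + 1 then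
    if !(pvP s i) && PySem.Chars.startswith (s.drop i) sub then (i : Int)
    else pvFU s sub (i + 1)
  else -1
termination_by s.length + 1 - i

theorem pvIsEscapedGo_shift_aux (s : List Char) : ∀ (m : Nat) (index : Int) (b : Nat), (index + 1).toNat ≤ m → pvIsEscapedGo s index b = b + pvIsEscapedGo s index 0 := by
  intro m
  induction m with
  | zero =>
    intro idx b h
    by_cases hc : 0 ≤ idx ∧ PySem.List.pyGet? s idx = some '\\'
    · exfalso; omega
    · rw [pvIsEscapedGo, dif_neg hc]
      conv_rhs => rw [pvIsEscapedGo, dif_neg hc]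
      omega
  | succ m ih =>
    intro idx b h
    by_cases hc : 0 ≤ idx ∧ PySem.List.pyGet? s idx = some '\\'
    · rw [pvIsEscapedGo, dif_pos hc]
      conv_rhs => rw [pvIsEscapedGo, dif_pos hc]
      rw [ih (idx - 1) (b + 1) (by omega), ih (idx - 1) 1 (by omega)]
      omega
    · rw [pvIsEscapedGo, dif_neg hc]
      conv_rhs => rw [pvIsEscapedGo, dif_neg hc]
      omega

theorem pvIsEscapedGo_shift (s : List Char) (index : Int) (b : Nat) :
    pvIsEscapedGo s index b = b + pvIsEscapedGo s index 0 :=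
  pvIsEscapedGo_shift_aux s (index + 1).toNat index b le_rfl

theorem pv_is_escaped_eq (s : List Char) (i : Nat) :
    pv_is_escaped (i : Int) s = if pvP s i then 1 else 0 := by
  induction i with
  | zero =>
    rw [pv_is_escaped, pvIsEscapedGo]
    norm_num [pvP]
  | succ i ih =>
    rw [pv_is_escaped] at ih ⊢
    have h1 : ((i : Int) + 1 - 1) = (i : Int) := by omega
    rw [show ((i + 1 : Nat) : Int) - 1 = (i : Int) by push_cast; omega]
    rw [pvIsEscapedGo]
    by_cases hbs : s.getD i ' ' = '\\'
    · have hi : i < s.length := by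
        by_contra hge
        rw [List.getD_eq_default] at hbs
        · exact absurd hbs (by decide)
        · omega
      have hget : PySem.List.pyGet? s (i : Int) = some '\\' := by
        rw [PySem.List.pyGet?_natCast]
        rw [List.getElem?_eq_getElem hi]
        rw [List.getD_eq_getElem s ' ' hi] at hbs
        simp [hbs]
      rw [dif_pos ⟨Int.natCast_nonneg i, hget⟩]
      rw [pvIsEscapedGo_shift]
      have : pvP s (i + 1) = !(pvP s i) := by rw [pvP, hbs]; simp
      rw [this]
      rcases Bool.eq_false_or_eq_true (pvP s i) with hp | hp <;>
        · rw [hp] at ih ⊢; simp at ih ⊢; omega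
    · have : ¬ (0 ≤ (i:Int) ∧ PySem.List.pyGet? s (i : Int) = some '\\') := by
        rintro ⟨-, hget⟩
        rw [PySem.List.pyGet?_natCast] at hget
        have hi : i < s.length := by
          by_contra hge
          rw [List.getElem?_eq_none (by omega)] at hget; simp at hget
        rw [List.getElem?_eq_getElem hi] at hget
        rw [List.getD_eq_getElem s ' ' hi] at hbs
        exact hbs (Option.some.inj hget)
      rw [dif_neg this]
      have : pvP s (i + 1) = false := by
        rw [pvP]
        have : (s.getD i ' ' == '\\') = false := beq_eq_false_iff_ne.mpr hbs
        rw [this]; simp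
      rw [this]
      simp

theorem pvFU_ge_neg_one (s sub : List Char) (i : Nat) :
    pvFU s sub i = -1 ∨ (0 ≤ pvFU s sub i ∧ pvFU s sub i = ((pvFU s sub i).toNat : Int)) := by
  fun_induction pvFU s sub i
  all_goals simp_all

theorem pvFU_skip (s sub : List Char) : ∀ (d i m : Nat), m ≤ i + d → i ≤ m →
    (∀ j, i ≤ j → j < m → ¬(pvP s j = false ∧ sub <+: s.drop j)) →
    pvFU s sub i = pvFU s sub m := by
  intro d
  induction d with
  | zero => intro i m h1 h2 _; have : i = m := by omega
            rw [this]
  | succ d ih =>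
    intro i m h1 h2 h
    rcases Nat.eq_or_lt_of_le h2 with heq | hlt
    · rw [heq]
    · have hcond : ¬(!(pvP s i) && PySem.Chars.startswith (s.drop i) sub) = true := by
        intro hc
        simp only [Bool.and_eq_true, Bool.not_eq_true'] at hc
        exact h i le_rfl hlt ⟨hc.1, (PySem.Chars.startswith_iff _ _).mp hc.2⟩
      have hrec : pvFU s sub i = pvFU s sub (i + 1) := by
        rw [pvFU]
        by_cases hl : i < s.length + 1
        · rw [if_pos hl, if_neg hcond]
        · rw [if_neg hl, pvFU, if_neg (show ¬ i + 1 < s.length + 1 by omega)]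
      rw [hrec]
      exact ih (i + 1) m (by omega) hlt (fun j hj1 hj2 => h j (by omega) hj2)

theorem pvFU_none (s sub : List Char) (i : Nat)
    (h : ∀ j, i ≤ j → ¬(pvP s j = false ∧ sub <+: s.drop j)) :
    pvFU s sub i = -1 := by
  by_cases hi : i ≤ s.length + 1
  · rw [pvFU_skip s sub (s.length + 1 - i) i (s.length + 1) (by omega) (by omega)
      (fun j hj1 hj2 => h j hj1)]
    rw [pvFU]
    simp
  · rw [pvFU]
    rw [if_neg (by omega)]

theorem not_infix_no_prefix (s sub : List Char) (k j : Nat) (hkj : k ≤ j)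
    (h : ¬ sub <:+: s.drop k) : ¬ sub <+: s.drop j := by
  intro hp
  apply h
  have hd : s.drop j = (s.drop k).drop (j - k) := by
    rw [List.drop_drop]; congr 1; omega
  rw [hd] at hp
  exact hp.isInfix.trans (List.drop_suffix _ _).isInfix

theorem findFrom_gt (s sub : List Char) (k : Int) (h : (s.length : Int) < k) :
    PySem.Chars.findFrom s sub k none = -1 := by
  simp only [PySem.Chars.findFrom]
  have h0 : (0:Int) ≤ s.length := by positivity
  rw [if_neg (show ¬ k < 0 by omega)]
  rw [if_pos (show (s.length:Int) < k from h)]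

theorem pv_is_escaped_neg_one (s : List Char) : pv_is_escaped (-1) s = 0 := by
  rw [pv_is_escaped, pvIsEscapedGo, dif_neg (by rintro ⟨hc, -⟩; omega)]

theorem pvFindNEGo_eq (s sub : List Char) : ∀ (fuel : Nat) (pos : Int), -1 ≤ pos → pos ≤ s.length →
    (s.length : Int) - pos < fuel →
    pvFindNEGo s sub fuel pos = pvFU s sub (pos + 1).toNat := by
  intro fuel
  induction fuel with
  | zero => intro pos h1 h2 h3; omega
  | succ f ih =>
    intro pos h1 h2 h3
    simp only [pvFindNEGo]
    by_cases hend : pos = (s.length : Int)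
    · rw [show pos + 1 = ((s.length : Int) + 1) by omega]
      rw [findFrom_gt s sub _ (by omega)]
      rw [if_neg (by simp [pv_is_escaped_neg_one])]
      rw [show ((s.length : Int) + 1).toNat = s.length + 1 by omega]
      rw [pvFU, if_neg (by omega)]
    · have hk : (pos + 1).toNat ≤ s.length := by omega
      rw [show pos + 1 = (((pos + 1).toNat : Nat) : Int) by omega]
      simp only [Int.toNat_natCast]
      set k := (pos + 1).toNat with hkdef
      by_cases hr : PySem.Chars.findFrom s sub (k : Int) = -1
      · rw [hr, if_neg (by simp [pv_is_escaped_neg_one])]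
        have hni : ¬ sub <:+: s.drop k := (PySem.Chars.findFrom_natCast_eq_neg_one_iff s sub k hk).mp hr
        rw [pvFU_none s sub k (fun j hj => by
          rintro ⟨-, hp⟩; exact not_infix_no_prefix s sub k j hj hni hp)]
      · obtain ⟨hge, hpre, hmin⟩ := PySem.Chars.findFrom_natCast_spec s sub k hk hr
        set r := PySem.Chars.findFrom s sub (k : Int) with hrdef
        have hrle : r ≤ (s.length : Int) := by
          have hfn := PySem.Chars.findFrom_natCast s sub k hk
          rw [← hrdef] at hfn
          have hfne : ¬ (PySem.Chars.find (s.drop k) sub = -1) :=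
            fun hE => hr (by rw [hfn, if_pos hE])
          rw [if_neg hfne] at hfn
          have hfl := PySem.Chars.find_le_length (s.drop k) sub
          rw [List.length_drop] at hfl
          omega
        have hr0 : (0:Int) ≤ r := le_trans (by positivity) hge
        by_cases hesc : pv_is_escaped r s ≠ 0
        · rw [if_pos hesc]
          have hP : pvP s r.toNat = true := by
            have heq := pv_is_escaped_eq s r.toNat
            rw [show ((r.toNat : Nat) : Int) = r by omega] at heq
            by_contra hf
            rw [Bool.not_eq_true] at hf
            rw [hf] at heq
            simp at heq
            exact hesc heq
          rw [ih r (by omega) hrle (by omega)]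
          rw [show (r + 1).toNat = r.toNat + 1 by omega]
          refine (pvFU_skip s sub (r.toNat + 1 - k) k (r.toNat + 1) (by omega) (by omega) ?_).symm
          intro j hj1 hj2
          rcases Nat.lt_or_ge j r.toNat with hlt | hge2
          · rintro ⟨-, hp⟩; exact hmin j hj1 hlt hp
          · have hje : j = r.toNat := by omega
            rw [hje]; rintro ⟨hp0, -⟩; rw [hP] at hp0; cases hp0
        · rw [if_neg hesc]
          have hP : pvP s r.toNat = false := by
            have heq := pv_is_escaped_eq s r.toNat
            rw [show ((r.toNat : Nat) : Int) = r by omega] at heq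
            by_contra hf
            rw [Bool.not_eq_false] at hf
            rw [hf] at heq
            simp at heq
            rw [heq] at hesc
            simp at hesc
          rw [pvFU_skip s sub (r.toNat - k) k r.toNat (by omega) (by omega)
            (fun j hj1 hj2 => by rintro ⟨-, hp⟩; exact hmin j hj1 hj2 hp)]
          rw [pvFU, if_pos (by omega)]
          rw [if_pos (by
            simp only [Bool.and_eq_true, Bool.not_eq_true']
            exact ⟨hP, (PySem.Chars.startswith_iff _ _).mpr hpre⟩)]
          omega

theorem pv_find_non_escaped_eq (sub s : List Char) :
    pv_find_non_escaped sub s = pvFU s sub 0 := by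
  rw [pv_find_non_escaped, pvFindNEGo_eq s sub (s.length + 2) (-1) (by omega) (by omega) (by omega)]
  norm_num

theorem pvEsc'_eq (s : List Char) (i : Nat) (cur : Bool) :
    (decide (i < s.length) && (s.getD i ' ' == '\\') && !cur) = ((s.getD i ' ' == '\\') && !cur) := by
  by_cases hl : i < s.length
  · simp [hl]
  · rw [List.getD_eq_default _ _ (by omega)]
    simp [hl]

theorem pv_is_escaped_ne_zero_iff (s : List Char) (i : Nat) :
    (pv_is_escaped (i : Int) s ≠ 0) ↔ pvP s i = true := by
  rw [pv_is_escaped_eq]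
  rcases Bool.eq_false_or_eq_true (pvP s i) with hp | hp <;> simp [hp]

theorem pvBGo_depth (s op cl : List Char) :
    ∀ d i (esc : Bool) (b fc ratio : Int), s.length + 1 ≤ i + d → esc = pvP s i → b ≠ -1 →
    pvBGo s op cl i esc b fc ratio = (b, pvADepthGo s op cl i ratio) := by
  intro d
  induction d with
  | zero =>
    intro i esc b fc ratio h1 h2 hb
    rw [pvBGo, if_neg (by omega), if_pos hb, pvADepthGo, if_neg (by omega)]
  | succ d ih =>
    intro i esc b fc ratio h1 h2 hb
    by_cases hil : i < s.length + 1
    swap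
    · rw [pvBGo, if_neg hil, if_pos hb, pvADepthGo, if_neg (by omega)]
    rw [pvBGo, if_pos hil, h2]
    rcases Bool.eq_false_or_eq_true (pvP s i) with hcur | hcur
    · -- escaped at i
      rw [hcur, if_pos rfl]
      have hstep : (decide (i < s.length) && (s.getD i ' ' == '\\') && !true) = pvP s (i + 1) := by
        rw [pvEsc'_eq, pvP, hcur]
      rw [ih (i + 1) _ b fc ratio (by omega) hstep hb]
      by_cases hl : i < s.length
      · conv_rhs => rw [pvADepthGo, if_pos hl, if_pos ((pv_is_escaped_ne_zero_iff s i).mpr hcur)]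
      · conv_rhs => rw [pvADepthGo, if_neg hl]
        rw [pvADepthGo, if_neg (show ¬ i + 1 < s.length by omega)]
    · -- not escaped at i
      rw [hcur]
      simp only [Bool.false_eq_true, if_false, if_neg hb]
      have hne : ¬ (pv_is_escaped (↑i) s ≠ 0) := by
        rw [pv_is_escaped_ne_zero_iff, hcur]; simp
      have hstep : (decide (i < s.length) && (s.getD i ' ' == '\\') && !false) = pvP s (i + 1) := by
        rw [pvEsc'_eq, pvP, hcur]
      by_cases hl : i < s.length
      · rw [if_pos hl, pvADepthGo, if_pos hl, if_neg hne]
        by_cases hz : (if [s.getD i ' '] = op then ratio + 1 else if [s.getD i ' '] = cl then ratio - 1 else ratio) = 0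
        · rw [if_pos hz, if_pos hz]
        · rw [if_neg hz, if_neg hz]
          exact ih (i + 1) _ b fc _ (by omega) hstep hb
      · rw [if_neg hl]
        rw [ih (i + 1) _ b fc ratio (by omega) hstep hb]
        conv_rhs => rw [pvADepthGo, if_neg hl]
        rw [pvADepthGo, if_neg (show ¬ i + 1 < s.length by omega)]

theorem pvFU_step (s sub : List Char) (i : Nat) (hil : i < s.length + 1)
    (hcond : (!(pvP s i) && PySem.Chars.startswith (s.drop i) sub) = false) :
    pvFU s sub i = pvFU s sub (i + 1) := by
  rw [pvFU, if_pos hil, if_neg (by simp [hcond])]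

theorem pvFU_hit (s sub : List Char) (i : Nat) (hil : i < s.length + 1)
    (hcond : (!(pvP s i) && PySem.Chars.startswith (s.drop i) sub) = true) :
    pvFU s sub i = (i : Int) := by
  rw [pvFU, if_pos hil, if_pos hcond]

theorem pvBGo_phase1 (s op cl : List Char) :
    ∀ d i (esc : Bool) (fc : Int), s.length + 1 ≤ i + d → esc = pvP s i →
    pvBGo s op cl i esc (-1) fc 1 =
      if pvFU s op i = -1 then (-1, if fc ≠ -1 then fc else pvFU s cl i)
      else (pvFU s op i, pvADepthGo s op cl ((pvFU s op i).toNat + 1) 1) := by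
  intro d
  induction d with
  | zero =>
    intro i esc fc h1 h2
    rw [pvBGo, if_neg (by omega)]
    have hop : pvFU s op i = -1 := by rw [pvFU, if_neg (by omega)]
    have hcl : pvFU s cl i = -1 := by rw [pvFU, if_neg (by omega)]
    rw [hop, if_pos rfl, hcl]
    by_cases hfc : fc = -1 <;> simp [hfc]
  | succ d ih =>
    intro i esc fc h1 h2
    by_cases hil : i < s.length + 1
    swap
    · rw [pvBGo, if_neg hil]
      have hop : pvFU s op i = -1 := by rw [pvFU, if_neg hil]
      have hcl : pvFU s cl i = -1 := by rw [pvFU, if_neg hil]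
      rw [hop, if_pos rfl, hcl]
      by_cases hfc : fc = -1 <;> simp [hfc]
    rw [pvBGo, if_pos hil, h2]
    rcases Bool.eq_false_or_eq_true (pvP s i) with hcur | hcur
    · -- escaped at i: both searches skip position i
      rw [hcur, if_pos rfl]
      have hstep : (decide (i < s.length) && (s.getD i ' ' == '\\') && !true) = pvP s (i + 1) := by
        rw [pvEsc'_eq, pvP, hcur]
      rw [ih (i + 1) _ fc (by omega) hstep]
      rw [pvFU_step s op i hil (by rw [hcur]; simp), pvFU_step s cl i hil (by rw [hcur]; simp)]
    · -- not escaped at i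
      rw [hcur]
      simp only [Bool.false_eq_true, if_false, if_true]
      have hstep : (decide (i < s.length) && (s.getD i ' ' == '\\') && !false) = pvP s (i + 1) := by
        rw [pvEsc'_eq, pvP, hcur]
      by_cases hopm : PySem.Chars.startswith (s.drop i) op
      · rw [if_pos hopm]
        rw [pvBGo_depth s op cl (d) (i + 1) _ (i : Int) fc 1 (by omega) hstep (by omega)]
        rw [pvFU_hit s op i hil (by rw [hcur, hopm]; simp)]
        rw [if_neg (by omega), Int.toNat_natCast]
      · rw [if_neg hopm]
        have hopstep : pvFU s op i = pvFU s op (i + 1) := by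
          rw [pvFU_step s op i hil (by simp only [Bool.not_eq_true] at hopm; simp [hopm])]
        by_cases hclm : fc = -1 ∧ PySem.Chars.startswith (s.drop i) cl
        · rw [if_pos hclm]
          rw [ih (i + 1) _ (i : Int) (by omega) hstep]
          rw [hopstep]
          have hclhit : pvFU s cl i = (i : Int) := pvFU_hit s cl i hil (by rw [hcur, hclm.2]; simp)
          rw [hclhit, hclm.1]
          by_cases hoe : pvFU s op (i + 1) = -1
          · rw [if_pos hoe, if_pos hoe]
            rw [if_pos (show (i : Int) ≠ -1 by omega)]
            rw [if_neg (show ¬ (-1 : Int) ≠ -1 by omega)]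
          · rw [if_neg hoe, if_neg hoe]
        · rw [if_neg hclm]
          rw [ih (i + 1) _ fc (by omega) hstep]
          rw [hopstep]
          by_cases hfc : fc = -1
          · have hclm' : PySem.Chars.startswith (s.drop i) cl = false := by
              rw [Bool.eq_false_iff]
              intro hc
              exact hclm ⟨hfc, hc⟩
            rw [pvFU_step s cl i hil (by simp [hclm'])]
          · simp [hfc]


-- ===== VERDICT (by name: the statement is the Claim_ definition above) =====
theorem find_brackets_pair_spec : Claim_equal_find_brackets_pair := by
  intro string opening closing _
  show find_brackets_pair string opening closing = find_brackets_pair_alt string opening closing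
  simp only [find_brackets_pair, find_brackets_pair_alt]
  rw [pvBGo_phase1 string.toList opening.toList closing.toList (string.toList.length + 1) 0 false
    (-1) (by omega) rfl]
  rw [pv_find_non_escaped_eq opening.toList string.toList,
    pv_find_non_escaped_eq closing.toList string.toList]
  by_cases hb : pvFU string.toList opening.toList 0 = -1
  · rw [if_pos hb, if_pos hb, hb]
    simp
  · rw [if_neg hb, if_neg hb]
    rcases pvFU_ge_neg_one string.toList opening.toList 0 with h | ⟨h0, hnat⟩
    · exact absurd h hb
    · rw [show (pvFU string.toList opening.toList 0 + 1).toNat =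
        (pvFU string.toList opening.toList 0).toNat + 1 by omega]
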